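-- pv_equiv track=rewrite | github.com/thealper2/codewars-solutions | 7-kyu/quicksum.py | quicksum
-- ===== SOURCE A (Python) =====
-- def quicksum(packet):
--     if not all(c == ' ' or ('A' <= c <= 'Z') for c in packet):
--         return 0
--
--     total = 0
--     for i, char in enumerate(packet, start=1):
--         if char == ' ':
--             continue
--
--         value = ord(char) - ord('A') + 1
--         total += i * value
--
--     return total
-- ===== SOURCE B (Python) =====
-- def quicksum(packet):
--     total = 0
--     for i, c in enumerate(packet, start=1):
--         if c == ' ':
--             continue
--         if not ('A' <= c <= 'Z'):
--             return 0
--         total += i * (ord(c) - ord('A') + 1)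
--     return total
-- ===== Notes on version B (the rewrite author's own statement) =====
-- stated objective: faster
-- what changed: B fuses A's separate validation pass and summation pass into a single enumerate loop with an early return 0 on the first invalid character.
import Mathlib
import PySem

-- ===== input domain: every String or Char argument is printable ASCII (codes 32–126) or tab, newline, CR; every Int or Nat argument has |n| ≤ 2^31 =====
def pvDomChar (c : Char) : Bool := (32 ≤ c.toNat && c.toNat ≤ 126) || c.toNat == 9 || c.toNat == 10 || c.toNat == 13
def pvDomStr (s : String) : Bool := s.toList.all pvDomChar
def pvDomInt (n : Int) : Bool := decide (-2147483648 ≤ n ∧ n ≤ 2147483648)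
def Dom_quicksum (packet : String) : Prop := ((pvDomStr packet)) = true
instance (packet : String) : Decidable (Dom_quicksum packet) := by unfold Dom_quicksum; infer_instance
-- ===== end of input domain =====

-- B fuses A's separate validation pass and summation pass into one enumerate loop
-- with an early return 0 on the first invalid character (objective: faster, one pass).

-- ===== PORT A =====
-- A's validity test: c == ' ' or 'A' <= c <= 'Z'
def pvValidA (c : Char) : Bool := (c == ' ') || (decide ('A' ≤ c) && decide (c ≤ 'Z'))

-- A's summation loop: for i, char in enumerate(packet, start=1)
def pvSumA (i total : Int) : List Char → Int
  | [] => total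
  | c :: cs =>
      if c == ' ' then pvSumA (i + 1) total cs
      else pvSumA (i + 1) (total + i * ((c.toNat : Int) - 65 + 1)) cs

def quicksum (packet : String) : Int :=
  if packet.toList.all pvValidA then pvSumA 1 0 packet.toList else 0

-- ===== PORT B =====
-- B's single loop with early return 0 on the first invalid character
def pvGoB (i total : Int) : List Char → Int
  | [] => total
  | c :: cs =>
      if c == ' ' then pvGoB (i + 1) total cs
      else if decide ('A' ≤ c) && decide (c ≤ 'Z') then
        pvGoB (i + 1) (total + i * ((c.toNat : Int) - 65 + 1)) cs
      else 0

def quicksum_alt (packet : String) : Int := pvGoB 1 0 packet.toList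

-- ===== PRECONDITION & SPEC =====
def Spec_quicksum (packet : String) (out : Int) : Prop := out = quicksum_alt packet
instance (packet : String) (out : Int) : Decidable (Spec_quicksum packet out) := by unfold Spec_quicksum; infer_instance

-- ===== CLAIM (what is proved, stated in full; the proofs are below) =====
def Claim_equal_quicksum : Prop := ∀ (packet : String), Dom_quicksum packet → Spec_quicksum packet (quicksum packet)

-- ===== LEMMAS AND PROOFS =====
theorem pvGoB_eq (cs : List Char) : ∀ (i total : Int),
    pvGoB i total cs = if cs.all pvValidA then pvSumA i total cs else 0 := by
  induction cs with
  | nil => intro i total; simp [pvGoB, pvSumA]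
  | cons c cs ih =>
      intro i total
      by_cases hsp : c = ' '
      · subst hsp
        simp [pvGoB, pvSumA, pvValidA, ih]
      · have hne : (c == ' ') = false := by simp [hsp]
        by_cases hup : 'A' ≤ c ∧ c ≤ 'Z'
        · simp [pvGoB, pvSumA, pvValidA, hne, hup.1, hup.2, ih]
        · have : (decide ('A' ≤ c) && decide (c ≤ 'Z')) = false := by
            simp only [Bool.and_eq_false_iff, decide_eq_false_iff_not]
            tauto
          simp [pvGoB, pvValidA, hne, this, List.all_cons]

-- ===== VERDICT (by name: the statement is the Claim_ definition above) =====
theorem quicksum_spec : Claim_equal_quicksum := by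
  intro packet _
  unfold Spec_quicksum quicksum quicksum_alt
  rw [pvGoB_eq]
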